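-- pv_equiv track=rewrite | github.com/ChavezCheong/adventofcode2024 | Day2/day2.py | updated_valid_row
-- ===== SOURCE A (Python) =====
-- def valid_row(row):
--         differences = [row[i+1] - row[i] for i in range(len(row) - 1)]
--         return (max(differences) <= 3 and min(differences) >= 1) or (max(differences) <= -1 and min(differences) >= -3)
--
-- def updated_valid_row(row):
--     if valid_row(row):
--         return True
--     else:
--         for i in range(len(row)):
--             row_copy = row.copy()
--             row_copy.pop(i)
--             if valid_row(row_copy):
--                 return True
--         return False
-- ===== SOURCE B (Python) =====
-- def _strict(row, lo, hi):
--     return all(lo <= row[k+1] - row[k] <= hi for k in range(len(row) - 1))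
--
-- def _first_bad(row, lo, hi):
--     for k in range(len(row) - 1):
--         d = row[k+1] - row[k]
--         if d < lo or d > hi:
--             return k
--     return None
--
-- def _tolerant(row, lo, hi):
--     i = _first_bad(row, lo, hi)
--     if i is None:
--         return True
--     # only removing an endpoint of the first bad pair can help
--     return _strict(row[:i] + row[i+1:], lo, hi) or _strict(row[:i+1] + row[i+2:], lo, hi)
--
-- def updated_valid_row(row):
--     return _tolerant(row, 1, 3) or _tolerant(row, -3, -1)
-- ===== Notes on version B (the rewrite author's own statement) =====
-- stated objective: faster
-- what changed: Instead of retrying the full max/min validity check after deleting each of the n positions, B makes one pass per direction to find the first out-of-range step and only tests deleting its two endpoints.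
import Mathlib
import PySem

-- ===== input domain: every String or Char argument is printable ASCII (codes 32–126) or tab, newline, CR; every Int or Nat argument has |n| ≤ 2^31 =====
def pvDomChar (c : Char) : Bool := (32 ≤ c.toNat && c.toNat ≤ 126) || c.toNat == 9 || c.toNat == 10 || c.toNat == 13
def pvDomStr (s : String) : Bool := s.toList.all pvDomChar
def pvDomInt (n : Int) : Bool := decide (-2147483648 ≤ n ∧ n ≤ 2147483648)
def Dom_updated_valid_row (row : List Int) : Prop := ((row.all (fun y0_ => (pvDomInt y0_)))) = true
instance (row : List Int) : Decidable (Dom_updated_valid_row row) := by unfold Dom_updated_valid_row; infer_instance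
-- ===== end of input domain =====

-- B replaces A's try-every-deletion rescan by one pass per direction that finds the first
-- out-of-range step and tests deleting only its two endpoints (measured faster on large rows).

-- ===== PORT A =====
-- valid_row: Option Bool, none exactly where Python's max()/min() of the empty diff list raise ValueError.
-- Indices i, i+1 fed to pyGetD are always in range (i ∈ range(len-1)), so the default 0 is never used.
def pvDiffsA (row : List Int) : List Int :=
  (PySem.List.pyRange 0 ((row.length : Int) - 1) 1).map
      (fun i => PySem.List.pyGetD row (i + 1) 0 - PySem.List.pyGetD row i 0)

def pvValidRowA (row : List Int) : Option Bool :=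
  match PySem.List.max? (pvDiffsA row) (fun x => x), PySem.List.min? (pvDiffsA row) (fun x => x) with
  | some M, some m => some (((M ≤ 3 : Bool) && (1 ≤ m : Bool)) || ((M ≤ -1 : Bool) && (-3 ≤ m : Bool)))
  | _, _ => none

def updated_valid_row (row : List Int) : Bool :=
  match pvValidRowA row with
  | some true => true
  | some false =>
      -- for i in range(len(row)): row_copy = row.copy(); row_copy.pop(i); if valid_row(row_copy): return True
      -- pop? is always some here; a none from the inner valid_row is a Python ValueError (outside Pre_), read as false.
      (PySem.List.pyRange 0 (row.length : Int) 1).any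
        (fun i => ((PySem.List.pop? row i).map (fun p => (pvValidRowA p.2).getD false)).getD false)
  | none => false  -- Python raises ValueError here (outside Pre_)

-- ===== PORT B =====
-- _strict(row, lo, hi): all steps within [lo, hi]
def pvChk (lo hi : Int) : List Int → Bool
  | x :: y :: t => ((lo ≤ y - x : Bool) && (y - x ≤ hi : Bool)) && pvChk lo hi (y :: t)
  | _ => true

-- _first_bad(row, lo, hi): index of the first out-of-range step
def pvFirstBad (lo hi : Int) : List Int → Option Nat
  | x :: y :: t =>
      if y - x < lo ∨ hi < y - x then some 0
      else (pvFirstBad lo hi (y :: t)).map (· + 1)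
  | _ => none

-- _tolerant: row[:i] + row[i+1:] is List.eraseIdx i
def pvTolerant (row : List Int) (lo hi : Int) : Bool :=
  match pvFirstBad lo hi row with
  | none => true
  | some i => pvChk lo hi (row.eraseIdx i) || pvChk lo hi (row.eraseIdx (i + 1))

def updated_valid_row_alt (row : List Int) : Bool :=
  pvTolerant row 1 3 || pvTolerant row (-3) (-1)

-- ===== PRECONDITION & SPEC =====
-- Pre_ = exactly the inputs where A returns: length ≥ 3, or length 2 with the single step already in range
-- (on shorter rows, and on length-2 rows with a bad step, Python's max() of an empty list raises ValueError).
def Pre_updated_valid_row (row : List Int) : Prop :=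
  3 ≤ row.length ∨
    (row.length = 2 ∧
      ((1 ≤ row.getD 1 0 - row.getD 0 0 ∧ row.getD 1 0 - row.getD 0 0 ≤ 3) ∨
       (-3 ≤ row.getD 1 0 - row.getD 0 0 ∧ row.getD 1 0 - row.getD 0 0 ≤ -1)))
instance (row : List Int) : Decidable (Pre_updated_valid_row row) := by
  unfold Pre_updated_valid_row; infer_instance

def pvWitness_updated_valid_row : List Int := [1, 2, 3]

def Spec_updated_valid_row (row : List Int) (out : Bool) : Prop := out = updated_valid_row_alt row
instance (row : List Int) (out : Bool) : Decidable (Spec_updated_valid_row row out) := by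
  unfold Spec_updated_valid_row; infer_instance

-- ===== CLAIM (what is proved, stated in full; the proofs are below) =====
def Claim_equal_updated_valid_row : Prop := ∀ (row : List Int), Dom_updated_valid_row row → Pre_updated_valid_row row → Spec_updated_valid_row row (updated_valid_row row)

-- ===== LEMMAS AND PROOFS =====

-- pvChk says: every adjacent step is within [lo, hi]
lemma pvChk_iff (lo hi : Int) (r : List Int) :
    pvChk lo hi r = true ↔ ∀ k (h : k + 1 < r.length), lo ≤ r[k + 1] - r[k] ∧ r[k + 1] - r[k] ≤ hi := by
  induction r with
  | nil => simp [pvChk]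
  | cons x rest ih =>
    cases rest with
    | nil => simp [pvChk]
    | cons y t =>
      rw [pvChk]
      simp only [Bool.and_eq_true, decide_eq_true_eq, ih, List.length_cons]
      constructor
      · rintro ⟨⟨h1, h2⟩, h3⟩ k hk
        cases k with
        | zero =>
          simp only [List.getElem_cons_zero, List.getElem_cons_succ]
          exact ⟨h1, h2⟩
        | succ j =>
          have h4 := h3 j (by omega)
          simp only [List.getElem_cons_succ]
          exact h4
      · intro h
        refine ⟨?_, fun j hj => ?_⟩
        · have := h 0 (by omega)
          simp only [List.getElem_cons_zero, List.getElem_cons_succ] at this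
          exact this
        · have := h (j + 1) (by omega)
          simp only [List.getElem_cons_succ] at this
          exact this

lemma pvFirstBad_none_iff (lo hi : Int) (r : List Int) :
    pvFirstBad lo hi r = none ↔ pvChk lo hi r = true := by
  induction r with
  | nil => simp [pvFirstBad, pvChk]
  | cons x rest ih =>
    cases rest with
    | nil => simp [pvFirstBad, pvChk]
    | cons y t =>
      rw [pvFirstBad, pvChk]
      split
      · rename_i hbad
        simp only [Bool.and_eq_true, decide_eq_true_eq]
        constructor
        · intro h; cases h
        · rintro ⟨⟨h1, h2⟩, _⟩; omega
      · rename_i hok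
        simp only [Option.map_eq_none_iff, ih, Bool.and_eq_true, decide_eq_true_eq]
        constructor
        · intro h; exact ⟨⟨by omega, by omega⟩, h⟩
        · rintro ⟨_, h⟩; exact h

lemma pvChk_false_of_firstBad_some (lo hi : Int) (r : List Int) (i : Nat)
    (h : pvFirstBad lo hi r = some i) : pvChk lo hi r = false := by
  cases hc : pvChk lo hi r
  · rfl
  · have h2 := (pvFirstBad_none_iff lo hi r).2 hc
    rw [h] at h2
    cases h2

lemma pvFirstBad_some (lo hi : Int) (r : List Int) (i : Nat)
    (h : pvFirstBad lo hi r = some i) :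
    i + 1 < r.length ∧ ¬(lo ≤ r.getD (i + 1) 0 - r.getD i 0 ∧ r.getD (i + 1) 0 - r.getD i 0 ≤ hi) := by
  induction r generalizing i with
  | nil => simp [pvFirstBad] at h
  | cons x rest ih =>
    cases rest with
    | nil => simp [pvFirstBad] at h
    | cons y t =>
      rw [pvFirstBad] at h
      split at h
      · rename_i hbad
        cases h
        refine ⟨by simp only [List.length_cons]; omega, ?_⟩
        simp only [List.getD_cons_succ, List.getD_cons_zero]
        omega
      · rename_i hok
        simp only [Option.map_eq_some_iff] at h
        obtain ⟨j, hj, rfl⟩ := h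
        have hih := ih j hj
        refine ⟨?_, ?_⟩
        · simp only [List.length_cons] at hih ⊢; omega
        · simp only [List.getD_cons_succ]
          exact hih.2

-- the core combinatorial fact: once the first bad step of a direction is at i,
-- deleting any j ∉ {i, i+1} leaves that step adjacent, so only i and i+1 can help
lemma any_erase_eq (lo hi : Int) (r : List Int) (i : Nat)
    (h : pvFirstBad lo hi r = some i) :
    ((List.range r.length).any fun j => pvChk lo hi (r.eraseIdx j)) =
      (pvChk lo hi (r.eraseIdx i) || pvChk lo hi (r.eraseIdx (i + 1))) := by
  obtain ⟨hlt, hbad⟩ := pvFirstBad_some lo hi r i h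
  rw [Bool.eq_iff_iff]
  simp only [List.any_eq_true, List.mem_range, Bool.or_eq_true]
  constructor
  · rintro ⟨j, hj, hchk⟩
    by_cases hji : j = i
    · exact Or.inl (hji ▸ hchk)
    by_cases hji1 : j = i + 1
    · exact Or.inr (hji1 ▸ hchk)
    exfalso
    rw [pvChk_iff] at hchk
    have hlen : (r.eraseIdx j).length = r.length - 1 := by
      rw [List.length_eraseIdx]; simp [hj]
    rw [List.getD_eq_getElem r 0 (by omega), List.getD_eq_getElem r 0 (by omega)] at hbad
    rcases Nat.lt_or_ge j i with hcase | hcase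
    · -- j < i: the bad pair sits at index i - 1 of the erased list
      obtain ⟨i', rfl⟩ : ∃ i', i = i' + 1 := ⟨i - 1, by omega⟩
      have hi1 : i' + 1 < (r.eraseIdx j).length := by omega
      have hp := hchk i' hi1
      rw [List.getElem_eraseIdx_of_ge _ (by omega), List.getElem_eraseIdx_of_ge _ (by omega)] at hp
      exact hbad hp
    · -- j > i + 1: the bad pair is untouched at index i
      have hi1 : i + 1 < (r.eraseIdx j).length := by omega
      have hp := hchk i hi1
      rw [List.getElem_eraseIdx_of_lt _ (by omega), List.getElem_eraseIdx_of_lt _ (by omega)] at hp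
      exact hbad hp
  · rintro (hc | hc)
    · exact ⟨i, by omega, hc⟩
    · exact ⟨i + 1, by omega, hc⟩

lemma pvTolerant_eq (lo hi : Int) (r : List Int) :
    pvTolerant r lo hi =
      (pvChk lo hi r || (List.range r.length).any fun j => pvChk lo hi (r.eraseIdx j)) := by
  unfold pvTolerant
  cases hfb : pvFirstBad lo hi r with
  | none =>
    have hc : pvChk lo hi r = true := (pvFirstBad_none_iff lo hi r).1 hfb
    simp [hc]
  | some i =>
    rw [pvChk_false_of_firstBad_some lo hi r i hfb, Bool.false_or, any_erase_eq lo hi r i hfb]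

-- membership in A's diff list
lemma mem_diffsA (row : List Int) (x : Int) :
    (x ∈ pvDiffsA row) ↔
    ∃ k : Nat, k + 1 < row.length ∧ x = row.getD (k + 1) 0 - row.getD k 0 := by
  unfold pvDiffsA
  simp only [List.mem_map, PySem.List.mem_pyRange_one]
  constructor
  · rintro ⟨i, ⟨h0, h1⟩, rfl⟩
    refine ⟨i.toNat, by omega, ?_⟩
    rw [show i + 1 = ((i.toNat + 1 : Nat) : Int) by omega, PySem.List.pyGetD_natCast,
        show i = ((i.toNat : Nat) : Int) by omega, PySem.List.pyGetD_natCast]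
    simp
    rw [max_eq_left h0]
  · rintro ⟨k, hk, rfl⟩
    refine ⟨(k : Int), ⟨by omega, by omega⟩, ?_⟩
    rw [show (k : Int) + 1 = ((k + 1 : Nat) : Int) by push_cast; ring, PySem.List.pyGetD_natCast,
        PySem.List.pyGetD_natCast]

-- A's valid_row, on rows with at least two elements, is exactly "all steps in [1,3] or all in [-3,-1]"
lemma pvValidRowA_eq (row : List Int) (hlen : 2 ≤ row.length) :
    pvValidRowA row = some (pvChk 1 3 row || pvChk (-3) (-1) row) := by
  unfold pvValidRowA
  have hne : pvDiffsA row ≠ [] := by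
    rw [← List.length_pos_iff]
    rw [pvDiffsA, List.length_map, PySem.List.length_pyRange_one]
    omega
  cases hM : PySem.List.max? (pvDiffsA row) (fun x => x) with
  | none => exact absurd ((PySem.List.max?_eq_none_iff (pvDiffsA row) _).1 hM) hne
  | some M =>
  cases hm : PySem.List.min? (pvDiffsA row) (fun x => x) with
  | none => exact absurd ((PySem.List.min?_eq_none_iff (pvDiffsA row) _).1 hm) hne
  | some m =>
  show some (((M ≤ 3 : Bool) && (1 ≤ m : Bool)) || ((M ≤ -1 : Bool) && (-3 ≤ m : Bool))) =
    some (pvChk 1 3 row || pvChk (-3) (-1) row)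
  simp only [Option.some.injEq]
  have hall : ∀ lo hi : Int,
      ((M ≤ hi ∧ lo ≤ m) ↔ ∀ x ∈ pvDiffsA row, lo ≤ x ∧ x ≤ hi) := by
    intro lo hi
    constructor
    · rintro ⟨h1, h2⟩ x hx
      exact ⟨le_trans h2 (PySem.List.min?_isMin hm x hx),
             le_trans (PySem.List.max?_isMax hM x hx) h1⟩
    · intro h
      exact ⟨(h M (PySem.List.max?_mem hM)).2, (h m (PySem.List.min?_mem hm)).1⟩
  have hchk : ∀ lo hi : Int,
      (pvChk lo hi row = true ↔ ∀ x ∈ pvDiffsA row, lo ≤ x ∧ x ≤ hi) := by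
    intro lo hi
    rw [pvChk_iff]
    constructor
    · intro h x hx
      rw [mem_diffsA] at hx
      obtain ⟨k, hk, rfl⟩ := hx
      have := h k hk
      rw [List.getD_eq_getElem row 0 (by omega), List.getD_eq_getElem row 0 (by omega)]
      exact this
    · intro h k hk
      have hmem : row.getD (k + 1) 0 - row.getD k 0 ∈ pvDiffsA row := by
        rw [mem_diffsA]; exact ⟨k, hk, rfl⟩
      have := h _ hmem
      rw [List.getD_eq_getElem row 0 (by omega), List.getD_eq_getElem row 0 (by omega)] at this
      exact this
  rw [Bool.eq_iff_iff]
  simp only [Bool.or_eq_true, Bool.and_eq_true, decide_eq_true_eq]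
  rw [hchk 1 3, hchk (-3) (-1), ← hall 1 3, ← hall (-3) (-1)]

-- A's deletion loop equals B's two tolerant scans once the base check failed
lemma pvLoopA_eq_alt (row : List Int) (hlen3 : 3 ≤ row.length)
    (h13 : pvChk 1 3 row = false) (hD : pvChk (-3) (-1) row = false) :
    ((PySem.List.pyRange 0 (row.length : Int) 1).any
        (fun i => ((PySem.List.pop? row i).map (fun p => (pvValidRowA p.2).getD false)).getD false)) =
      updated_valid_row_alt row := by
  have herase : ∀ k : Nat, k < row.length →
      pvValidRowA (row.eraseIdx k) =
        some (pvChk 1 3 (row.eraseIdx k) || pvChk (-3) (-1) (row.eraseIdx k)) := by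
    intro k hk
    exact pvValidRowA_eq _ (by rw [List.length_eraseIdx]; split <;> omega)
  unfold updated_valid_row_alt
  rw [pvTolerant_eq, pvTolerant_eq, h13, hD, Bool.false_or, Bool.false_or]
  rw [Bool.eq_iff_iff]
  simp only [List.any_eq_true, Bool.or_eq_true, PySem.List.mem_pyRange_one, List.mem_range]
  constructor
  · rintro ⟨i, ⟨h0, h1⟩, hp⟩
    rw [show i = ((i.toNat : Nat) : Int) by omega,
        PySem.List.pop?_natCast row i.toNat (by omega)] at hp
    simp only [Option.map_some, Option.getD_some] at hp
    rw [herase i.toNat (by omega)] at hp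
    simp only [Option.getD_some, Bool.or_eq_true] at hp
    rcases hp with h | h
    · exact Or.inl ⟨i.toNat, by omega, h⟩
    · exact Or.inr ⟨i.toNat, by omega, h⟩
  · have build : ∀ k : Nat, k < row.length →
        (pvChk 1 3 (row.eraseIdx k) = true ∨ pvChk (-3) (-1) (row.eraseIdx k) = true) →
        ∃ i : Int, (0 ≤ i ∧ i < (row.length : Int)) ∧
          ((PySem.List.pop? row i).map (fun p => (pvValidRowA p.2).getD false)).getD false = true := by
      intro k hk hor
      refine ⟨(k : Int), ⟨by omega, by omega⟩, ?_⟩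
      rw [PySem.List.pop?_natCast row k hk]
      simp only [Option.map_some, Option.getD_some]
      rw [herase k hk]
      simp only [Option.getD_some, Bool.or_eq_true]
      exact hor
    rintro (⟨k, hk, h⟩ | ⟨k, hk, h⟩)
    · exact build k hk (Or.inl h)
    · exact build k hk (Or.inr h)

-- ===== VERDICT (by name: the statement is the Claim_ definition above) =====
theorem updated_valid_row_spec : Claim_equal_updated_valid_row := by
  intro row _hdom hpre
  unfold Spec_updated_valid_row updated_valid_row
  have hlen2 : 2 ≤ row.length := by
    rcases hpre with h | ⟨h, _⟩ <;> omega
  rw [pvValidRowA_eq row hlen2]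
  cases hbase : (pvChk 1 3 row || pvChk (-3) (-1) row) with
  | true =>
    have halt : updated_valid_row_alt row = true := by
      rcases Bool.or_eq_true_iff.1 hbase with h | h <;>
        simp [updated_valid_row_alt, pvTolerant_eq, h]
    exact halt.symm
  | false =>
    have h13 : pvChk 1 3 row = false := by
      cases hc : pvChk 1 3 row
      · rfl
      · simp [hc] at hbase
    have hD : pvChk (-3) (-1) row = false := by
      cases hc : pvChk (-3) (-1) row
      · rfl
      · simp [hc] at hbase
    have hlen3 : 3 ≤ row.length := by
      rcases hpre with h | ⟨h, hc⟩
      · exact h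
      · exfalso
        obtain ⟨a, b, rfl⟩ : ∃ a b, row = [a, b] := by
          rcases row with _ | ⟨a, _ | ⟨b, _ | ⟨c, t⟩⟩⟩
          · simp at h
          · simp at h
          · exact ⟨a, b, rfl⟩
          · simp [List.length_cons] at h
        simp only [List.getD_cons_succ, List.getD_cons_zero] at hc
        simp [pvChk] at h13 hD
        omega
    exact pvLoopA_eq_alt row hlen3 h13 hD
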